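-- pv_equiv track=rewrite | github.com/Jeffersongre/Processamento_Documentos | processar_documentos_demo.py | extrair_metadados_documento
-- ===== SOURCE A (Python) =====
-- def extrair_metadados_documento(texto_primeira_pagina):
--     linhas = [linha.strip() for linha in texto_primeira_pagina.splitlines() if linha.strip()]
--     nome_entidade = None
--     codigo_documento = None
--
--     for linha in linhas:
--         if linha.startswith("Entidade:"):
--             nome_entidade = linha.split(":", 1)[1].strip()
--         elif linha.startswith("Documento:"):
--             codigo_documento = linha.split(":", 1)[1].strip()
--
--     return {
--         "nome_entidade": nome_entidade,
--         "codigo_documento": codigo_documento,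
--     }
-- ===== SOURCE B (Python) =====
-- def extrair_metadados_documento(texto_primeira_pagina):
--     # One pass building a key -> value table (last occurrence wins), then two lookups.
--     tabela = {}
--     for linha in texto_primeira_pagina.splitlines():
--         linha = linha.strip()
--         if ":" in linha:
--             partes = linha.split(":", 1)
--             tabela[partes[0]] = partes[1].strip()
--     return {
--         "nome_entidade": tabela.get("Entidade"),
--         "codigo_documento": tabela.get("Documento"),
--     }
-- ===== Notes on version B (the rewrite author's own statement) =====
-- stated objective: simpler
-- what changed: Replaces the two prefix-tested scalar accumulators with a single pass that indexes every colon-bearing line into a dict keyed by the text before the first colon (last occurrence wins), followed by two final lookups.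
import Mathlib
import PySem

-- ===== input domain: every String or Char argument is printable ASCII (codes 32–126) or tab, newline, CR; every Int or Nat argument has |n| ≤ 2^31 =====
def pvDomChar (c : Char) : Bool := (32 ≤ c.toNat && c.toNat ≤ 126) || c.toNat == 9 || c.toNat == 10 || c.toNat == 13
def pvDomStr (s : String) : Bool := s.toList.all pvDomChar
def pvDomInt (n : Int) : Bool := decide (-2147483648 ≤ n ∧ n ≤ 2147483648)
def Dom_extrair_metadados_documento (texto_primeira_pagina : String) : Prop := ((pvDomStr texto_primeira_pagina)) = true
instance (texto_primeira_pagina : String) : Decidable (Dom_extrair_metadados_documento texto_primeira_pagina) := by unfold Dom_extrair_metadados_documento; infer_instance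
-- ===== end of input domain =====

-- B replaces A's two prefix-tested scalar accumulators with one dict-indexing pass plus two final
-- lookups (objective: simpler).

-- ===== PORT A =====
-- A's loop body.  linha.split(":", 1)[1] is ported as `.getD 1 ""`: inside both branches the
-- tested prefix contains ':', so the split always has a second piece and the default is never used.
def pvAStep (st : Option String × Option String) (linha : String) : Option String × Option String :=
  if PySem.Str.startswith linha "Entidade:" then
    (some (PySem.Str.strip (((PySem.Str.splitMax? linha ":" 1).getD []).getD 1 "")), st.2)
  else if PySem.Str.startswith linha "Documento:" then
    (st.1, some (PySem.Str.strip (((PySem.Str.splitMax? linha ":" 1).getD []).getD 1 "")))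
  else st

def extrair_metadados_documento (texto_primeira_pagina : String) : List (String × Option String) :=
  let linhas := ((PySem.Str.splitlines texto_primeira_pagina).filter
      (fun linha => PySem.Str.strip linha ≠ "")).map PySem.Str.strip
  let st := linhas.foldl pvAStep ((none : Option String), (none : Option String))
  [("nome_entidade", st.1), ("codigo_documento", st.2)]

-- ===== PORT B =====
-- B's loop body: strip the raw line; if it contains ':', index it into the table.
def pvBStep (tabela : PySem.Dict String String) (linha0 : String) : PySem.Dict String String :=
  if PySem.Str.isIn ":" (PySem.Str.strip linha0) then
    tabela.insert (((PySem.Str.splitMax? (PySem.Str.strip linha0) ":" 1).getD []).getD 0 "")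
      (PySem.Str.strip (((PySem.Str.splitMax? (PySem.Str.strip linha0) ":" 1).getD []).getD 1 ""))
  else tabela

def extrair_metadados_documento_alt (texto_primeira_pagina : String) : List (String × Option String) :=
  let tabela := (PySem.Str.splitlines texto_primeira_pagina).foldl pvBStep PySem.Dict.empty
  [("nome_entidade", tabela.get? "Entidade"), ("codigo_documento", tabela.get? "Documento")]

-- ===== PRECONDITION & SPEC =====
def Spec_extrair_metadados_documento (texto_primeira_pagina : String) (out : List (String × Option String)) : Prop := out = extrair_metadados_documento_alt texto_primeira_pagina
instance (texto_primeira_pagina : String) (out : List (String × Option String)) : Decidable (Spec_extrair_metadados_documento texto_primeira_pagina out) := by unfold Spec_extrair_metadados_documento; infer_instance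

-- ===== CLAIM (what is proved, stated in full; the proofs are below) =====
def Claim_equal_extrair_metadados_documento : Prop := ∀ (texto_primeira_pagina : String), Dom_extrair_metadados_documento texto_primeira_pagina → Spec_extrair_metadados_documento texto_primeira_pagina (extrair_metadados_documento texto_primeira_pagina)

-- ===== LEMMAS AND PROOFS =====

-- Characterisation of PySem.Chars.splitOnMax.go with separator ":".
theorem pv_go_m0 (fuel : Nat) (cs cur : List Char) (acc : List (List Char)) :
    PySem.Chars.splitOnMax.go [':'] fuel 0 cs cur acc = ((cur.reverse ++ cs) :: acc).reverse := by
  cases fuel with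
  | zero => simp [PySem.Chars.splitOnMax.go]
  | succ f =>
    cases cs with
    | nil => simp [PySem.Chars.splitOnMax.go]
    | cons c rest => rw [PySem.Chars.splitOnMax.go]; simp

theorem pv_go_m1_colon (fuel : Nat) (cs cur : List Char) (acc : List (List Char))
    (hf : cs.length ≤ fuel) (h : ':' ∈ cs) :
    PySem.Chars.splitOnMax.go [':'] fuel 1 cs cur acc =
      acc.reverse ++ [cur.reverse ++ cs.takeWhile (· ≠ ':'), (cs.dropWhile (· ≠ ':')).tail] := by
  induction fuel generalizing cs cur acc with
  | zero =>
    cases cs with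
    | nil => simp at h
    | cons c rest => simp at hf
  | succ f ih =>
    cases cs with
    | nil => simp at h
    | cons c rest =>
      rw [PySem.Chars.splitOnMax.go]
      simp only [if_neg (one_ne_zero)]
      by_cases hc : c = ':'
      · subst hc
        have hp : [':'].isPrefixOf (':' :: rest) = true := by simp [List.isPrefixOf]
        rw [hp]
        simp only [if_true]
        rw [show List.drop [':'].length (':' :: rest) = rest from rfl, pv_go_m0]
        simp [List.takeWhile, List.dropWhile]
      · have hp : [':'].isPrefixOf (c :: rest) = false := by
          simp [List.isPrefixOf]; exact fun h' => hc h'.symm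
        rw [hp]
        simp only [if_neg (Bool.false_ne_true)]
        have hr : ':' ∈ rest := by cases h with
          | head => exact absurd rfl hc
          | tail _ h' => exact h'
        rw [ih rest (c :: cur) acc (by simpa using Nat.le_of_succ_le_succ hf) hr]
        simp [List.takeWhile, List.dropWhile, hc]

theorem pv_splitOnMax_colon (cs : List Char) (h : ':' ∈ cs) :
    PySem.Chars.splitOnMax cs [':'] 1 =
      [cs.takeWhile (· ≠ ':'), (cs.dropWhile (· ≠ ':')).tail] := by
  rw [PySem.Chars.splitOnMax, if_neg (by norm_num)]
  rw [show Int.toNat 1 = 1 from rfl, pv_go_m1_colon _ _ _ _ (Nat.le_succ _) h]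
  simp

-- "k:" is a prefix of cs  iff  cs contains ':' and the part before its first ':' is exactly k.
theorem pv_prefix_key_iff (k cs : List Char) (hk : ':' ∉ k) :
    (k ++ [':']).isPrefixOf cs = true ↔ ':' ∈ cs ∧ cs.takeWhile (· ≠ ':') = k := by
  induction k generalizing cs with
  | nil =>
    cases cs with
    | nil => simp
    | cons c rest =>
      simp only [List.nil_append, List.isPrefixOf, List.takeWhile]
      constructor
      · intro hc
        have : ':' = c := by simpa using (Bool.and_eq_true ..).mp hc |>.1
        subst this
        simp
      · rintro ⟨_, h2⟩
        by_cases hc : c = ':'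
        · subst hc; simp
        · simp [hc] at h2
  | cons a k' ih =>
    have ha : a ≠ ':' := fun h' => hk (h' ▸ List.mem_cons_self ..)
    cases cs with
    | nil => simp
    | cons c rest =>
      simp only [List.cons_append, List.isPrefixOf, Bool.and_eq_true, beq_iff_eq, List.takeWhile]
      by_cases hc : c = a
      · subst hc
        rw [ih rest (fun h' => hk (List.mem_cons_of_mem _ h'))]
        simp [ha]
        intro _ h2
        exact absurd h2.symm ha
      · constructor
        · rintro ⟨h1, _⟩; exact absurd h1.symm hc
        · rintro ⟨h1, h2⟩
          by_cases hcc : c = ':'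
          · simp [hcc] at h2
          · simp [hcc] at h2
            exact absurd h2.1 hc

-- The pieces of  linha.split(":", 1)  when linha contains a ':'.
theorem pv_partes_colon (l : String) (h : ':' ∈ l.toList) :
    (PySem.Str.splitMax? l ":" 1).getD [] =
      [String.ofList (l.toList.takeWhile (· ≠ ':')),
       String.ofList ((l.toList.dropWhile (· ≠ ':')).tail)] := by
  rw [PySem.Str.splitMax?, PySem.Chars.splitMax?]
  rw [if_neg (by decide)]
  rw [show (":" : String).toList = [':'] from rfl, pv_splitOnMax_colon _ h]
  rfl

theorem pv_isIn_iff (l : String) : PySem.Str.isIn ":" l = true ↔ ':' ∈ l.toList := by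
  rw [show PySem.Str.isIn ":" l = PySem.Chars.isIn [':'] l.toList from rfl]
  rw [PySem.Chars.isIn_iff_infix, List.singleton_infix_iff]

theorem pv_startswithE_iff (l : String) :
    PySem.Str.startswith l "Entidade:" = true ↔
      ':' ∈ l.toList ∧ l.toList.takeWhile (· ≠ ':') = "Entidade".toList := by
  rw [show PySem.Str.startswith l "Entidade:" =
      ("Entidade".toList ++ [':']).isPrefixOf l.toList from rfl]
  exact pv_prefix_key_iff _ _ (by decide)

theorem pv_startswithD_iff (l : String) :
    PySem.Str.startswith l "Documento:" = true ↔
      ':' ∈ l.toList ∧ l.toList.takeWhile (· ≠ ':') = "Documento".toList := by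
  rw [show PySem.Str.startswith l "Documento:" =
      ("Documento".toList ++ [':']).isPrefixOf l.toList from rfl]
  exact pv_prefix_key_iff _ _ (by decide)

-- One raw line preserves the invariant relating B's table to A's two accumulators.
theorem pv_step (l0 : String) (d : PySem.Dict String String) (st : Option String × Option String)
    (hE : d.get? "Entidade" = st.1) (hD : d.get? "Documento" = st.2) :
    (pvBStep d l0).get? "Entidade" =
        (if PySem.Str.strip l0 ≠ "" then pvAStep st (PySem.Str.strip l0) else st).1 ∧
      (pvBStep d l0).get? "Documento" =
        (if PySem.Str.strip l0 ≠ "" then pvAStep st (PySem.Str.strip l0) else st).2 := by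
  rw [pvBStep]
  set l := PySem.Str.strip l0 with hl
  by_cases hnil : l = ""
  · simp [hnil, show PySem.Chars.isIn [':'] [] = false by decide, hE, hD]
  · rw [if_pos hnil, pvAStep]
    by_cases h1 : PySem.Str.startswith l "Entidade:" = true
    · obtain ⟨hmem, htake⟩ := (pv_startswithE_iff l).mp h1
      rw [if_pos ((pv_isIn_iff l).mpr hmem), if_pos h1]
      rw [pv_partes_colon l hmem, htake,
        show String.ofList (String.toList "Entidade") = "Entidade" by decide]
      simp only [List.getD_cons_zero, List.getD_cons_succ]
      refine ⟨by rw [PySem.Dict.get?_insert_self], ?_⟩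
      rw [PySem.Dict.get?_insert_of_ne _ _ (by decide : ("Documento" : String) ≠ "Entidade")]
      simpa using hD
    · by_cases h2 : PySem.Str.startswith l "Documento:" = true
      · obtain ⟨hmem, htake⟩ := (pv_startswithD_iff l).mp h2
        rw [if_pos ((pv_isIn_iff l).mpr hmem), if_neg h1, if_pos h2]
        rw [pv_partes_colon l hmem, htake,
          show String.ofList (String.toList "Documento") = "Documento" by decide]
        simp only [List.getD_cons_zero, List.getD_cons_succ]
        refine ⟨?_, by rw [PySem.Dict.get?_insert_self]⟩
        rw [PySem.Dict.get?_insert_of_ne _ _ (by decide : ("Entidade" : String) ≠ "Documento")]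
        simpa using hE
      · rw [if_neg h1, if_neg h2]
        by_cases hmem : ':' ∈ l.toList
        · rw [if_pos ((pv_isIn_iff l).mpr hmem), pv_partes_colon l hmem]
          simp only [List.getD_cons_zero, List.getD_cons_succ]
          have hkE : ("Entidade" : String) ≠ String.ofList (l.toList.takeWhile (· ≠ ':')) := by
            intro hk
            have : l.toList.takeWhile (· ≠ ':') = "Entidade".toList := by
              have := congrArg String.toList hk.symm
              simpa [String.toList_ofList] using this
            exact h1 ((pv_startswithE_iff l).mpr ⟨hmem, this⟩)
          have hkD : ("Documento" : String) ≠ String.ofList (l.toList.takeWhile (· ≠ ':')) := by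
            intro hk
            have : l.toList.takeWhile (· ≠ ':') = "Documento".toList := by
              have := congrArg String.toList hk.symm
              simpa [String.toList_ofList] using this
            exact h2 ((pv_startswithD_iff l).mpr ⟨hmem, this⟩)
          exact ⟨by rw [PySem.Dict.get?_insert_of_ne _ _ hkE]; exact hE,
                 by rw [PySem.Dict.get?_insert_of_ne _ _ hkD]; exact hD⟩
        · rw [if_neg (by simpa using (fun h => hmem ((pv_isIn_iff l).mp h)))]
          exact ⟨hE, hD⟩

-- The whole loop preserves it.
set_option maxHeartbeats 1000000 in
theorem pv_fold (ls : List String) (d : PySem.Dict String String)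
    (st : Option String × Option String)
    (hE : d.get? "Entidade" = st.1) (hD : d.get? "Documento" = st.2) :
    (ls.foldl pvBStep d).get? "Entidade" =
        (ls.foldl (fun st l0 => if PySem.Str.strip l0 ≠ "" then pvAStep st (PySem.Str.strip l0) else st) st).1 ∧
      (ls.foldl pvBStep d).get? "Documento" =
        (ls.foldl (fun st l0 => if PySem.Str.strip l0 ≠ "" then pvAStep st (PySem.Str.strip l0) else st) st).2 := by
  induction ls generalizing d st with
  | nil => exact ⟨hE, hD⟩
  | cons l0 ls ih =>
    obtain ⟨h1, h2⟩ := pv_step l0 d st hE hD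
    exact ih (pvBStep d l0)
      (if PySem.Str.strip l0 ≠ "" then pvAStep st (PySem.Str.strip l0) else st) h1 h2

-- ===== VERDICT (by name: the statement is the Claim_ definition above) =====
theorem extrair_metadados_documento_spec : Claim_equal_extrair_metadados_documento := by
  intro t _
  unfold Spec_extrair_metadados_documento
  simp only [extrair_metadados_documento, extrair_metadados_documento_alt]
  rw [List.foldl_map, List.foldl_filter]
  obtain ⟨h1, h2⟩ := pv_fold (PySem.Str.splitlines t) PySem.Dict.empty (none, none) rfl rfl
  have hfun : (fun (x : Option String × Option String) (y : String) =>
        if (decide (PySem.Str.strip y ≠ "")) = true then pvAStep x (PySem.Str.strip y) else x) =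
      (fun st l0 => if PySem.Str.strip l0 ≠ "" then pvAStep st (PySem.Str.strip l0) else st) := by
    funext x y
    by_cases h : PySem.Str.strip y = "" <;> simp [h]
  rw [hfun, h1, h2]
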